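-- pv_equiv track=rewrite | github.com/zushicat/cologne-trees-REST-API | data_preparation/1_3_make_base_data_merge.py | _recalc_age_values
-- ===== SOURCE A (Python) =====
-- from typing import Any, Dict, List
--
-- def _recalc_age_values(tree_age_data: Dict[str, Any], planting_age: int) -> Dict[str, Any]:
--     '''
--     Gets the "tree_age" object part.
--     '''
--     tree_age_data["year_sprout"] = tree_age_data["year_planting"] - planting_age
--     tree_age_data["age_in_2017"] = 2017 - tree_age_data["year_sprout"]
--     tree_age_data["age_in_2020"] = 2020 - tree_age_data["year_sprout"]
--
--     for j, group in enumerate([(1,6), (6,16), (16,40), (40,1000)]):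
--         lower_boundary = group[0]
--         upper_boundary = group[1]
--         if tree_age_data["age_in_2020"] >= lower_boundary and tree_age_data["age_in_2020"] < upper_boundary:
--             tree_age_data["age_group_2020"] = j
--             break
--
--     return tree_age_data
-- ===== SOURCE B (Python) =====
-- def _recalc_age_values(tree_age_data, planting_age):
--     '''
--     Gets the "tree_age" object part.
--     '''
--     year_sprout = tree_age_data["year_planting"] - planting_age
--     tree_age_data["year_sprout"] = year_sprout
--     tree_age_data["age_in_2017"] = 2017 - year_sprout
--     age = 2020 - year_sprout
--     tree_age_data["age_in_2020"] = age
--     if 1 <= age < 1000: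
--         tree_age_data["age_group_2020"] = sum(age >= cut for cut in (6, 16, 40))
--     return tree_age_data
-- ===== Notes on version B (the rewrite author's own statement) =====
-- stated objective: simpler
-- what changed: Replaced the enumerate-over-boundary-tuples scan with break by a single range guard plus counting how many cut points (6,16,40) the age has reached; the three arithmetic assignments reuse one locally computed year_sprout instead of re-reading the dict.
import Mathlib
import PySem

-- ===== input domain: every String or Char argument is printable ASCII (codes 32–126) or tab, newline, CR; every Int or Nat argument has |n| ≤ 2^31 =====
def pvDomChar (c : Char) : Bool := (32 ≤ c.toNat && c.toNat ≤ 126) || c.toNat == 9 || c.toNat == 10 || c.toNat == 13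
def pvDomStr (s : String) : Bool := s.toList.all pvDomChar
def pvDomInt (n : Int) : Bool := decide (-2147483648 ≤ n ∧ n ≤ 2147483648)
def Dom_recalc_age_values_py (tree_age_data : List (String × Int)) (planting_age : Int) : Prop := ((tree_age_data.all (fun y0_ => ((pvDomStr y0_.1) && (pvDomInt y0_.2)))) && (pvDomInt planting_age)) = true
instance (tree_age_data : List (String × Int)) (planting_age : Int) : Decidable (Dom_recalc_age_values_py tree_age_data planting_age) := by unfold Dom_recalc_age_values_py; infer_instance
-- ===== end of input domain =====

-- B replaces A's enumerate-over-boundary-pairs scan (with break) by a range guard plus a count of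
-- cut points reached — simpler, same behaviour; both versions mutate the input dict in place in
-- Python (same mutations), the equivalence proved here is about the returned dict.


-- ===== PORT A =====
-- the 'for j, group in enumerate([...]): ... break' loop, transliterated
def pvLoopA (d : PySem.Dict String Int) (groups : List (Int × Int × Int)) : PySem.Dict String Int :=
  match groups with
  | [] => d
  | (j, group) :: rest =>
    let lower_boundary := group.1
    let upper_boundary := group.2
    if d.getD "age_in_2020" 0 ≥ lower_boundary ∧ d.getD "age_in_2020" 0 < upper_boundary then
      d.insert "age_group_2020" j
    else pvLoopA d rest

def recalc_age_values_py (tree_age_data : List (String × Int)) (planting_age : Int) : List (String × Int) :=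
  let d0 := PySem.Dict.mk tree_age_data
  -- d0["year_planting"] raises KeyError when absent: excluded by Pre_; getD's default is never used inside Pre_
  let d1 := d0.insert "year_sprout" (d0.getD "year_planting" 0 - planting_age)
  let d2 := d1.insert "age_in_2017" (2017 - d1.getD "year_sprout" 0)
  let d3 := d2.insert "age_in_2020" (2020 - d2.getD "year_sprout" 0)
  (pvLoopA d3 (PySem.List.enumerate [((1:Int),(6:Int)), (6,16), (16,40), (40,1000)])).items

-- ===== PORT B =====
def recalc_age_values_py_alt (tree_age_data : List (String × Int)) (planting_age : Int) : List (String × Int) :=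
  let d0 := PySem.Dict.mk tree_age_data
  -- same KeyError point as A: outside Pre_ only
  let year_sprout := d0.getD "year_planting" 0 - planting_age
  let d1 := d0.insert "year_sprout" year_sprout
  let d2 := d1.insert "age_in_2017" (2017 - year_sprout)
  let age := 2020 - year_sprout
  let d3 := d2.insert "age_in_2020" age
  let d4 := if 1 ≤ age ∧ age < 1000 then
      d3.insert "age_group_2020" (([6, 16, 40] : List Int).foldl (fun s cut => s + (if age ≥ cut then 1 else 0)) 0)
    else d3
  d4.items

-- ===== PRECONDITION & SPEC =====
-- Pre_ excludes exactly the inputs where Python A raises KeyError: no "year_planting" key.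
def Pre_recalc_age_values_py (tree_age_data : List (String × Int)) (planting_age : Int) : Prop :=
  (PySem.Dict.mk tree_age_data).contains "year_planting" = true
instance (tree_age_data : List (String × Int)) (planting_age : Int) : Decidable (Pre_recalc_age_values_py tree_age_data planting_age) := by unfold Pre_recalc_age_values_py; infer_instance

def pvWitness_recalc_age_values_py : (List (String × Int)) × Int := ([("year_planting", 2000)], 5)

def Spec_recalc_age_values_py (tree_age_data : List (String × Int)) (planting_age : Int) (out : List (String × Int)) : Prop := out = recalc_age_values_py_alt tree_age_data planting_age
instance (tree_age_data : List (String × Int)) (planting_age : Int) (out : List (String × Int)) : Decidable (Spec_recalc_age_values_py tree_age_data planting_age out) := by unfold Spec_recalc_age_values_py; infer_instance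

-- ===== CLAIM (what is proved, stated in full; the proofs are below) =====
def Claim_equal_recalc_age_values_py : Prop := ∀ (tree_age_data : List (String × Int)) (planting_age : Int), Dom_recalc_age_values_py tree_age_data planting_age → Pre_recalc_age_values_py tree_age_data planting_age → Spec_recalc_age_values_py tree_age_data planting_age (recalc_age_values_py tree_age_data planting_age)

-- ===== LEMMAS AND PROOFS =====

-- A's boundary loop equals B's guarded cut-point count, for any dict whose "age_in_2020" is age
theorem pvLoopA_eq_count (d : PySem.Dict String Int) (age : Int)
    (h : d.getD "age_in_2020" 0 = age) :
    pvLoopA d (PySem.List.enumerate [((1:Int),(6:Int)), (6,16), (16,40), (40,1000)]) =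
    (if 1 ≤ age ∧ age < 1000 then
      d.insert "age_group_2020" (([6, 16, 40] : List Int).foldl (fun s cut => s + (if age ≥ cut then 1 else 0)) 0)
    else d) := by
  simp only [PySem.List.enumerate, pvLoopA, List.foldl, h]
  split_ifs <;> first | rfl | omega

-- ===== VERDICT (by name: the statement is the Claim_ definition above) =====
theorem recalc_age_values_py_spec : Claim_equal_recalc_age_values_py := by
  intro l p _dom _pre
  unfold Spec_recalc_age_values_py recalc_age_values_py recalc_age_values_py_alt
  dsimp only
  rw [pvLoopA_eq_count _ (2020 - ((PySem.Dict.mk l).getD "year_planting" 0 - p))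
        (by simp [PySem.Dict.getD_insert])]
  simp [PySem.Dict.getD_insert]
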